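-- pv_equiv track=rewrite | github.com/daniel-levitan/introduction_to_recursive_programming | Chapter6/exercises_2/ex3/ex3.py | expand_right
-- ===== SOURCE A (Python) =====
-- def expand_right(l):
-- 	maxx = l[0]
-- 	result = [l[0]]
-- 	for i in range(1, len(l)):
-- 		if maxx + l[i] >= maxx:
-- 			result.append(l[i])
-- 			maxx += l[i]
-- 		else:
-- 			break
-- 	return result
-- ===== SOURCE B (Python) =====
-- def expand_right(l):
--     # Precompute the cumulative-sum table, then scan it for the first descent
--     # and slice the answer off in one go (different decomposition from A's
--     # single fused loop with a running max and an output accumulator).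
--     sums = []
--     t = 0
--     for x in l:
--         t += x
--         sums.append(t)
--     cut = len(l)
--     for i in range(1, len(l)):
--         if sums[i] < sums[i - 1]:
--             cut = i
--             break
--     return l[:cut]
-- ===== Notes on version B (the rewrite author's own statement) =====
-- stated objective: alternative
-- what changed: B precomputes the cumulative-sum table in one pass, then scans it for the first descent and returns the slice l[:cut], instead of A's fused loop that grows a result list while maintaining a running total and breaking inline.
import Mathlib
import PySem

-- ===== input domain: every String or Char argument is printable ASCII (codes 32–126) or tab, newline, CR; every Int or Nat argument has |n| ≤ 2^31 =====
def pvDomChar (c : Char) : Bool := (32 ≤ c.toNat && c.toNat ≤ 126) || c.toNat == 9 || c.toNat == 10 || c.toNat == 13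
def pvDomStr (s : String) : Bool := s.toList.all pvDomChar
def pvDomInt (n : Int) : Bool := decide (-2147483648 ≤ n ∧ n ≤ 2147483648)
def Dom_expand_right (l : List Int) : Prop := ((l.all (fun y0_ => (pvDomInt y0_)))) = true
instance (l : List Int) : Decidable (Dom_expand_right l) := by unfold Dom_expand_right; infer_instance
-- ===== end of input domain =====

-- B replaces A's fused loop (running total + growing result + inline break) by a
-- precomputed cumulative-sum table scanned for its first descent, returning l[:cut]
-- (objective: alternative decomposition, same O(n) cost).


-- ===== PORT A =====
-- A's for-loop over range(1, len(l)) with break, state (maxx, result), as index recursion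
def expandRightLoop (l : List Int) (maxx : Int) (result : List Int) (i : Nat) : List Int :=
  if h : i < l.length then
    let x := l[i]
    if maxx + x ≥ maxx then
      expandRightLoop l (maxx + x) (result ++ [x]) (i + 1)
    else
      result
  else
    result
termination_by l.length - i

def expand_right (l : List Int) : List Int :=
  match l with
  | [] => []                      -- Python raises IndexError here (first-element access); excluded by Pre_
  | x :: _ => expandRightLoop l x [x] 1

-- ===== PORT B =====
-- first loop of Source B: build sums by appending the running total
def sumsLoop (l : List Int) : List Int × Int :=
  l.foldl (fun (st : List Int × Int) x => (st.1 ++ [st.2 + x], st.2 + x)) ([], 0)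

-- second loop of Source B: find the first i in range(1, n) with sums[i] < sums[i-1]
def cutLoop (sums : List Int) (n : Nat) (i : Nat) : Nat :=
  if h : i < n then
    if sums.getD i 0 < sums.getD (i - 1) 0 then i
    else cutLoop sums n (i + 1)
  else n
termination_by n - i

def expand_right_alt (l : List Int) : List Int :=
  let sums := (sumsLoop l).1
  let cut := cutLoop sums l.length 1
  PySem.List.slice l none (some (cut : Int))     -- l[:cut]

-- ===== PRECONDITION & SPEC =====
-- Pre_ excludes only the empty list, on which A raises IndexError at its first-element access.
def Pre_expand_right (l : List Int) : Prop := l ≠ []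
instance (l : List Int) : Decidable (Pre_expand_right l) := by unfold Pre_expand_right; infer_instance
def pvWitness_expand_right : List Int := ([3, -1, 2])

def Spec_expand_right (l : List Int) (out : List Int) : Prop := out = expand_right_alt l
instance (l : List Int) (out : List Int) : Decidable (Spec_expand_right l out) := by unfold Spec_expand_right; infer_instance

-- ===== CLAIM (what is proved, stated in full; the proofs are below) =====
def Claim_equal_expand_right : Prop := ∀ (l : List Int), Dom_expand_right l → Pre_expand_right l → Spec_expand_right l (expand_right l)

-- ===== LEMMAS AND PROOFS =====

-- the common reference value: l.take i ++ the nonnegative run of l.drop i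
def refFrom (l : List Int) (i : Nat) : List Int :=
  l.take i ++ (l.drop i).takeWhile (fun y => decide (0 ≤ y))

-- A's loop computes refFrom, for any running total s (its test s + x ≥ s is 0 ≤ x)
theorem expandRightLoop_eq_aux (l : List Int) :
    ∀ k i s, l.length - i ≤ k → expandRightLoop l s (l.take i) i = refFrom l i := by
  intro k
  induction k with
  | zero =>
    intro i s hk
    unfold expandRightLoop refFrom
    rw [dif_neg (by omega)]
    rw [List.drop_eq_nil_of_le (by omega), List.take_of_length_le (by omega)]
    simp
  | succ k ih =>
    intro i s hk
    unfold expandRightLoop refFrom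
    split_ifs with h
    · have hdrop : l.drop i = l[i] :: l.drop (i + 1) := List.drop_eq_getElem_cons h
      by_cases hx : (0 : Int) ≤ l[i]
      · have hc : s + l[i] ≥ s := by omega
        simp only [hc, if_pos]
        have htake : l.take i ++ [l[i]] = l.take (i + 1) := by
          rw [List.take_succ]
          simp [List.getElem?_eq_getElem h]
        rw [htake, ih (i + 1) (s + l[i]) (by omega)]
        unfold refFrom
        rw [hdrop, List.takeWhile_cons, if_pos (by simpa using hx), ← htake,
          List.append_assoc, List.singleton_append]
      · have hc : ¬ (s + l[i] ≥ s) := by omega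
        simp only [hc, if_neg, not_false_iff]
        rw [hdrop]
        simp [hx]
    · rw [List.drop_eq_nil_of_le (by omega), List.take_of_length_le (by omega)]
      simp

theorem expandRightLoop_eq (l : List Int) (i : Nat) (s : Int) :
    expandRightLoop l s (l.take i) i = refFrom l i :=
  expandRightLoop_eq_aux l l.length i s (by omega)

-- the scan list produced by Source B's first loop
def scanSums : List Int → Int → List Int
  | [], _ => []
  | x :: xs, t => (t + x) :: scanSums xs (t + x)

theorem sumsLoop_fst (l : List Int) :
    ∀ (acc : List Int) (t : Int),
      (l.foldl (fun (st : List Int × Int) x => (st.1 ++ [st.2 + x], st.2 + x)) (acc, t)).1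
        = acc ++ scanSums l t := by
  induction l with
  | nil => intro acc t; simp [scanSums]
  | cons x xs ih => intro acc t; simp [List.foldl, scanSums, ih]

theorem scanSums_getD_zero (l : List Int) (t : Int) (h : l ≠ []) :
    (scanSums l t).getD 0 0 = t + l.getD 0 0 := by
  cases l with
  | nil => exact absurd rfl h
  | cons x xs => simp [scanSums]

-- adjacent difference of the scan is the list element
theorem scanSums_step (l : List Int) :
    ∀ (i : Nat) (t : Int), i + 1 < l.length →
      (scanSums l t).getD (i + 1) 0 = (scanSums l t).getD i 0 + l.getD (i + 1) 0 := by
  induction l with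
  | nil => intro i t h; simp at h
  | cons x xs ih =>
    intro i t h
    cases i with
    | zero =>
      have hxs : xs ≠ [] := by
        cases xs with
        | nil => simp at h
        | cons _ _ => simp
      simp only [scanSums, List.getD_cons_succ, List.getD_cons_zero]
      rw [scanSums_getD_zero xs (t + x) hxs]
    | succ j =>
      simp only [scanSums, List.getD_cons_succ]
      exact ih (j) (t + x) (by simp at h ⊢; omega)

-- B's scan loop: l.take of its result is refFrom, for every start i ≥ 1
theorem cutLoop_take_aux (l : List Int) :
    ∀ k i, 1 ≤ i → l.length - i ≤ k →
      l.take (cutLoop (scanSums l 0) l.length i) = refFrom l i := by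
  intro k
  induction k with
  | zero =>
    intro i h1 hk
    unfold cutLoop refFrom
    rw [dif_neg (by omega)]
    rw [List.take_length, List.drop_eq_nil_of_le (by omega),
      List.take_of_length_le (by omega)]
    simp
  | succ k ih =>
    intro i h1 hk
    unfold cutLoop refFrom
    split_ifs with h hlt
    · -- descent found at i: sums[i] < sums[i-1], i.e. l[i] < 0
      have hstep := scanSums_step l (i - 1) 0 (by omega)
      have hi1 : i - 1 + 1 = i := by omega
      rw [hi1] at hstep
      have hget : l.getD i 0 = l[i] := List.getD_eq_getElem l 0 h
      rw [hstep, hget] at hlt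
      have hx : ¬ ((0 : Int) ≤ l[i]) := by omega
      rw [List.drop_eq_getElem_cons h]
      simp [hx]
    · -- no descent at i: l[i] ≥ 0, recurse
      have hstep := scanSums_step l (i - 1) 0 (by omega)
      have hi1 : i - 1 + 1 = i := by omega
      rw [hi1] at hstep
      have hget : l.getD i 0 = l[i] := List.getD_eq_getElem l 0 h
      rw [hstep, hget] at hlt
      have hx : (0 : Int) ≤ l[i] := by omega
      rw [ih (i + 1) (by omega) (by omega)]
      unfold refFrom
      rw [List.drop_eq_getElem_cons h, List.takeWhile_cons, if_pos (by simpa using hx)]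
      have htake : l.take (i + 1) = l.take i ++ [l[i]] := by
        rw [List.take_succ]
        simp [List.getElem?_eq_getElem h]
      rw [htake, List.append_assoc, List.singleton_append]
    · rw [List.take_length, List.drop_eq_nil_of_le (by omega),
        List.take_of_length_le (by omega)]
      simp

theorem cutLoop_take (l : List Int) (i : Nat) (h1 : 1 ≤ i) :
    l.take (cutLoop (scanSums l 0) l.length i) = refFrom l i :=
  cutLoop_take_aux l l.length i h1 (by omega)

theorem expand_right_alt_eq (l : List Int) (h : l ≠ []) :
    expand_right_alt l = refFrom l 1 := by
  unfold expand_right_alt sumsLoop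
  rw [sumsLoop_fst l [] 0, List.nil_append]
  rw [PySem.List.slice_to_natCast]
  exact cutLoop_take l 1 le_rfl

-- ===== VERDICT (by name: the statement is the Claim_ definition above) =====
theorem expand_right_spec : Claim_equal_expand_right := by
  intro l _ hpre
  unfold Spec_expand_right
  rw [expand_right_alt_eq l hpre]
  cases l with
  | nil => exact absurd rfl hpre
  | cons x xs =>
    show expandRightLoop (x :: xs) x [x] 1 = _
    have h1 : [x] = (x :: xs).take 1 := by simp
    rw [h1]
    exact expandRightLoop_eq (x :: xs) 1 x
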